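-- pv_equiv track=rewrite | github.com/MTrajK/coding-problems | Dynamic Programming/create_palindrom.py | create_palindrome_2
-- ===== SOURCE A (Python) =====
-- def create_palindrome_2(word):
--     n = len(word)
--     dp = [[0 for j in range(n)] for i in range(n)]
--
--     # run dp
--     for gap in range(1, n):
--         left = 0
--         for right in range(gap, n):
--             if word[left] == word[right]:
--                 dp[left][right] = dp[left + 1][right - 1]
--             else:
--                 dp[left][right] = min(dp[left][right - 1], dp[left + 1][right]) + 1
--             left += 1
--
--     # build the palindrome using the dp table
--     return build_palindrome(word, dp, 0, n-1)
--
-- def build_palindrome(word, dp, left, right):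
--     # similar like the first solution, but without exponentialy branching
--     # this is linear time, we already know the inserting values
--     if left > right:
--         return ''
--     if left == right:
--         return word[left]
--
--     if word[left] == word[right]:
--         return word[left] + build_palindrome(word, dp, left + 1, right - 1) + word[left]
--
--     if dp[left + 1][right] < dp[left][right - 1]:
--         return word[left] + build_palindrome(word, dp, left + 1, right) + word[left]
--
--     return word[right] + build_palindrome(word, dp, left, right - 1) + word[right]
-- ===== SOURCE B (Python) =====
-- def create_palindrome_2(word):
--     # top-down memoized insertion-cost + iterative two-pointer build
--     n = len(word)
--     memo = {}
--
--     def cost(l, r):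
--         if l >= r:
--             return 0
--         if (l, r) in memo:
--             return memo[(l, r)]
--         if word[l] == word[r]:
--             v = cost(l + 1, r - 1)
--         else:
--             v = min(cost(l, r - 1), cost(l + 1, r)) + 1
--         memo[(l, r)] = v
--         return v
--
--     pre = []
--     suf = []
--     l, r = 0, n - 1
--     while l < r:
--         if word[l] == word[r]:
--             pre.append(word[l]); suf.append(word[l])
--             l += 1; r -= 1
--         elif cost(l + 1, r) < cost(l, r - 1):
--             pre.append(word[l]); suf.append(word[l])
--             l += 1
--         else:
--             pre.append(word[r]); suf.append(word[r])
--             r -= 1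
--     mid = word[l] if l == r else ''
--     suf.reverse()
--     return ''.join(pre) + mid + ''.join(suf)
-- ===== Notes on version B (the rewrite author's own statement) =====
-- stated objective: alternative
-- what changed: The bottom-up gap/diagonal dp sweep over an n x n table is replaced by top-down memoized recursion on (left,right), and the recursive palindrome build is replaced by an iterative two-pointer loop accumulating a prefix and a suffix; branch logic and tie-breaking are identical.
import Mathlib
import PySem

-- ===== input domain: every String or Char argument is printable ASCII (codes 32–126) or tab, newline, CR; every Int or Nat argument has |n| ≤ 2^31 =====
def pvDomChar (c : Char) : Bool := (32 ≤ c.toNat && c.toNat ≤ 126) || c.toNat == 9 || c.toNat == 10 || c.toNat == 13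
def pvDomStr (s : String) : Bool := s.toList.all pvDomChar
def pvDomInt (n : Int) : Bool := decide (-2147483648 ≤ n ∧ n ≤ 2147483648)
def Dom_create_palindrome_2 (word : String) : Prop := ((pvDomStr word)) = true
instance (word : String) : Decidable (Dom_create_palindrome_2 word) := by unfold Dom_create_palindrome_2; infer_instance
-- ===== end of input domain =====

-- B replaces A's bottom-up gap/diagonal dp sweep by top-down memoized recursion and A's
-- recursive palindrome build by an iterative two-pointer loop with prefix/suffix accumulators
-- (objective: alternative decomposition, same asymptotic cost).

-- ===== PORT A =====
-- dp[i][j] read / write (indices are always in range in A)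
def pvGet2 (dp : List (List Int)) (i j : Int) : Int :=
  PySem.List.pyGetD (PySem.List.pyGetD dp i []) j 0

def pvSet2 (dp : List (List Int)) (i j : Int) (v : Int) : List (List Int) :=
  PySem.List.pySetD dp i (PySem.List.pySetD (PySem.List.pyGetD dp i []) j v)

-- body of A's inner 'for right in range(gap, n)' loop; state = (dp, left)
def pvStep (w : List Char) (st : List (List Int) × Int) (right : Int) :
    List (List Int) × Int :=
  let dp := st.1
  let left := st.2
  let dp' :=
    if PySem.List.pyGetD w left ' ' = PySem.List.pyGetD w right ' ' then
      pvSet2 dp left right (pvGet2 dp (left + 1) (right - 1))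
    else
      pvSet2 dp left right (min (pvGet2 dp left (right - 1)) (pvGet2 dp (left + 1) right) + 1)
  (dp', left + 1)

-- one iteration of A's outer 'for gap in range(1, n)' loop
def pvGapPass (w : List Char) (dp : List (List Int)) (gap : Int) : List (List Int) :=
  ((PySem.List.pyRange gap (w.length : Int) 1).foldl (pvStep w) (dp, 0)).1

-- A's recursive build_palindrome helper
def pvBuildA (w : List Char) (dp : List (List Int)) (left right : Int) : List Char :=
  if left > right then []
  else if left = right then [PySem.List.pyGetD w left ' ']
  else if PySem.List.pyGetD w left ' ' = PySem.List.pyGetD w right ' ' then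
    PySem.List.pyGetD w left ' ' ::
      (pvBuildA w dp (left + 1) (right - 1) ++ [PySem.List.pyGetD w left ' '])
  else if pvGet2 dp (left + 1) right < pvGet2 dp left (right - 1) then
    PySem.List.pyGetD w left ' ' ::
      (pvBuildA w dp (left + 1) right ++ [PySem.List.pyGetD w left ' '])
  else
    PySem.List.pyGetD w right ' ' ::
      (pvBuildA w dp left (right - 1) ++ [PySem.List.pyGetD w right ' '])
termination_by (right - left + 1).toNat
decreasing_by all_goals omega

def create_palindrome_2 (word : String) : String :=
  let w := word.toList
  let n : Int := w.length
  let dp0 : List (List Int) :=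
    (PySem.List.pyRange 0 n 1).map (fun _ => (PySem.List.pyRange 0 n 1).map (fun _ => (0 : Int)))
  let dp := (PySem.List.pyRange 1 n 1).foldl (pvGapPass w) dp0
  String.ofList (pvBuildA w dp 0 (n - 1))

-- ===== PORT B =====
-- B's memoized cost(l, r); the memo dict is threaded through
def pvCostM (w : List Char) (memo : PySem.Dict (Int × Int) Int) (l r : Int) :
    Int × PySem.Dict (Int × Int) Int :=
  if l ≥ r then (0, memo)
  else
    match memo.get? (l, r) with
    | some v => (v, memo)
    | none =>
      if PySem.List.pyGetD w l ' ' = PySem.List.pyGetD w r ' ' then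
        let p := pvCostM w memo (l + 1) (r - 1)
        (p.1, p.2.insert (l, r) p.1)
      else
        let p := pvCostM w memo l (r - 1)
        let q := pvCostM w p.2 (l + 1) r
        let v := min p.1 q.1 + 1
        (v, q.2.insert (l, r) v)
termination_by (r - l).toNat
decreasing_by all_goals omega

-- B's 'while l < r' two-pointer loop; returns (pre, suf, l, r, memo)
def pvBuildLoop (w : List Char) (memo : PySem.Dict (Int × Int) Int) (l r : Int)
    (pre suf : List Char) :
    List Char × List Char × Int × Int × PySem.Dict (Int × Int) Int :=
  if l < r then
    if PySem.List.pyGetD w l ' ' = PySem.List.pyGetD w r ' ' then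
      pvBuildLoop w memo (l + 1) (r - 1)
        (pre ++ [PySem.List.pyGetD w l ' ']) (suf ++ [PySem.List.pyGetD w l ' '])
    else
      let p := pvCostM w memo (l + 1) r
      let q := pvCostM w p.2 l (r - 1)
      if p.1 < q.1 then
        pvBuildLoop w q.2 (l + 1) r
          (pre ++ [PySem.List.pyGetD w l ' ']) (suf ++ [PySem.List.pyGetD w l ' '])
      else
        pvBuildLoop w q.2 l (r - 1)
          (pre ++ [PySem.List.pyGetD w r ' ']) (suf ++ [PySem.List.pyGetD w r ' '])
  else (pre, suf, l, r, memo)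
termination_by (r - l).toNat
decreasing_by all_goals omega

def create_palindrome_2_alt (word : String) : String :=
  let w := word.toList
  let n : Int := w.length
  let res := pvBuildLoop w PySem.Dict.empty 0 (n - 1) [] []
  let pre := res.1
  let suf := res.2.1
  let l := res.2.2.1
  let r := res.2.2.2.1
  let mid : List Char := if l = r then [PySem.List.pyGetD w l ' '] else []
  String.ofList (pre ++ mid ++ suf.reverse)

-- ===== PRECONDITION & SPEC =====
def Spec_create_palindrome_2 (word : String) (out : String) : Prop := out = create_palindrome_2_alt word
instance (word : String) (out : String) : Decidable (Spec_create_palindrome_2 word out) := by unfold Spec_create_palindrome_2; infer_instance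

-- ===== CLAIM (what is proved, stated in full; the proofs are below) =====
def Claim_equal_create_palindrome_2 : Prop := ∀ (word : String), Dom_create_palindrome_2 word → Spec_create_palindrome_2 word (create_palindrome_2 word)

-- ===== LEMMAS AND PROOFS =====

-- pure minimum-insertion cost, the common mathematical content of both dp computations
def pvC (w : List Char) (l r : Int) : Int :=
  if l ≥ r then 0
  else if PySem.List.pyGetD w l ' ' = PySem.List.pyGetD w r ' ' then pvC w (l + 1) (r - 1)
  else min (pvC w l (r - 1)) (pvC w (l + 1) r) + 1
termination_by (r - l).toNat
decreasing_by all_goals omega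

theorem pvC_of_ge (w : List Char) {l r : Int} (h : r ≤ l) : pvC w l r = 0 := by
  rw [pvC]; simp [h]

-- pure recursive build (A's build_palindrome with dp lookups replaced by pvC)
def pvBuildS (w : List Char) (l r : Int) : List Char :=
  if l > r then []
  else if l = r then [PySem.List.pyGetD w l ' ']
  else if PySem.List.pyGetD w l ' ' = PySem.List.pyGetD w r ' ' then
    PySem.List.pyGetD w l ' ' :: (pvBuildS w (l + 1) (r - 1) ++ [PySem.List.pyGetD w l ' '])
  else if pvC w (l + 1) r < pvC w l (r - 1) then
    PySem.List.pyGetD w l ' ' :: (pvBuildS w (l + 1) r ++ [PySem.List.pyGetD w l ' '])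
  else
    PySem.List.pyGetD w r ' ' :: (pvBuildS w l (r - 1) ++ [PySem.List.pyGetD w r ' '])
termination_by (r - l + 1).toNat
decreasing_by all_goals omega

-- ===== B side =====

def pvValid (w : List Char) (m : PySem.Dict (Int × Int) Int) : Prop :=
  ∀ l r v, m.get? (l, r) = some v → v = pvC w l r

theorem pvValid_empty (w : List Char) : pvValid w PySem.Dict.empty := by
  intro l r v h
  simp [PySem.Dict.get?_empty] at h

theorem pvCostM_spec (w : List Char) (l r : Int) (m : PySem.Dict (Int × Int) Int)
    (hm : pvValid w m) :
    (pvCostM w m l r).1 = pvC w l r ∧ pvValid w (pvCostM w m l r).2 := by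
  rw [pvCostM]
  by_cases hge : l ≥ r
  · simp only [if_pos hge]
    exact ⟨(pvC_of_ge w hge).symm, hm⟩
  · simp only [if_neg hge]
    cases hv : m.get? (l, r) with
    | some v => exact ⟨hm l r v hv, hm⟩
    | none =>
      have hClr : pvC w l r =
          (if PySem.List.pyGetD w l ' ' = PySem.List.pyGetD w r ' ' then pvC w (l + 1) (r - 1)
           else min (pvC w l (r - 1)) (pvC w (l + 1) r) + 1) := by
        rw [pvC]; rw [if_neg hge]
      by_cases hc : PySem.List.pyGetD w l ' ' = PySem.List.pyGetD w r ' '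
      · simp only [if_pos hc]
        have ih := pvCostM_spec w (l + 1) (r - 1) m hm
        refine ⟨by simpa [hClr, hc] using ih.1, ?_⟩
        intro l' r' v' h
        rw [PySem.Dict.get?_insert] at h
        by_cases hk : ((l', r') : Int × Int) = (l, r)
        · rw [if_pos hk] at h
          cases h
          obtain ⟨h1, h2⟩ := Prod.mk.injEq .. ▸ hk
          subst h1; subst h2
          rw [hClr, if_pos hc]; exact ih.1
        · rw [if_neg hk] at h
          exact ih.2 l' r' v' h
      · simp only [if_neg hc]
        have ih1 := pvCostM_spec w l (r - 1) m hm
        have ih2 := pvCostM_spec w (l + 1) r (pvCostM w m l (r - 1)).2 ih1.2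
        refine ⟨by simp [hClr, hc, ih1.1, ih2.1], ?_⟩
        intro l' r' v' h
        rw [PySem.Dict.get?_insert] at h
        by_cases hk : ((l', r') : Int × Int) = (l, r)
        · rw [if_pos hk] at h
          cases h
          obtain ⟨h1, h2⟩ := Prod.mk.injEq .. ▸ hk
          subst h1; subst h2
          rw [hClr, if_neg hc, ih1.1, ih2.1]
        · rw [if_neg hk] at h
          exact ih2.2 l' r' v' h
termination_by (r - l).toNat
decreasing_by all_goals omega

def pvFinish (w : List Char)
    (res : List Char × List Char × Int × Int × PySem.Dict (Int × Int) Int) : List Char :=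
  res.1 ++ (if res.2.2.1 = res.2.2.2.1 then [PySem.List.pyGetD w res.2.2.1 ' '] else []) ++
    res.2.1.reverse

theorem pvBuildLoop_spec (w : List Char) (m : PySem.Dict (Int × Int) Int) (l r : Int)
    (pre suf : List Char) (hm : pvValid w m) :
    pvFinish w (pvBuildLoop w m l r pre suf) = pre ++ pvBuildS w l r ++ suf.reverse := by
  rw [pvBuildLoop]
  by_cases hlr : l < r
  · simp only [if_pos hlr]
    have hS : pvBuildS w l r =
        (if PySem.List.pyGetD w l ' ' = PySem.List.pyGetD w r ' ' then
          PySem.List.pyGetD w l ' ' :: (pvBuildS w (l + 1) (r - 1) ++ [PySem.List.pyGetD w l ' '])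
        else if pvC w (l + 1) r < pvC w l (r - 1) then
          PySem.List.pyGetD w l ' ' :: (pvBuildS w (l + 1) r ++ [PySem.List.pyGetD w l ' '])
        else
          PySem.List.pyGetD w r ' ' :: (pvBuildS w l (r - 1) ++ [PySem.List.pyGetD w r ' '])) := by
      rw [pvBuildS, if_neg (by omega), if_neg (by omega)]
    by_cases hc : PySem.List.pyGetD w l ' ' = PySem.List.pyGetD w r ' '
    · simp only [if_pos hc]
      rw [pvBuildLoop_spec w m (l + 1) (r - 1) _ _ hm, hS, if_pos hc]
      simp
    · simp only [if_neg hc]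
      have h1 := pvCostM_spec w (l + 1) r m hm
      have h2 := pvCostM_spec w l (r - 1) (pvCostM w m (l + 1) r).2 h1.2
      by_cases hlt : (pvCostM w m (l + 1) r).1 < (pvCostM w (pvCostM w m (l + 1) r).2 l (r - 1)).1
      · simp only [if_pos hlt]
        rw [pvBuildLoop_spec w _ (l + 1) r _ _ h2.2, hS, if_neg hc,
          if_pos (by rw [← h1.1, ← h2.1]; exact hlt)]
        simp
      · simp only [if_neg hlt]
        rw [pvBuildLoop_spec w _ l (r - 1) _ _ h2.2, hS, if_neg hc,
          if_neg (by rw [← h1.1, ← h2.1]; exact hlt)]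
        simp
  · simp only [if_neg hlr]
    by_cases heq : l = r
    · rw [pvBuildS, if_neg (by omega), if_pos heq]
      simp [pvFinish, heq]
    · rw [pvBuildS, if_pos (by omega)]
      simp [pvFinish, heq]
termination_by (r - l).toNat
decreasing_by all_goals omega

-- ===== A side: correctness of the dp table =====

theorem pvBuildA_eq (w : List Char) (dp : List (List Int))
    (htab : ∀ l r : Int, 0 ≤ l → l < (w.length : Int) → 0 ≤ r → r < (w.length : Int) →
      pvGet2 dp l r = if l < r then pvC w l r else 0)
    (l r : Int) (hl : 0 ≤ l) (hr : r < (w.length : Int)) :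
    pvBuildA w dp l r = pvBuildS w l r := by
  rw [pvBuildA, pvBuildS]
  by_cases hgt : l > r
  · rw [if_pos hgt, if_pos hgt]
  · rw [if_neg hgt, if_neg hgt]
    by_cases heq : l = r
    · rw [if_pos heq, if_pos heq]
    · rw [if_neg heq, if_neg heq]
      have hlr : l < r := by omega
      by_cases hc : PySem.List.pyGetD w l ' ' = PySem.List.pyGetD w r ' '
      · rw [if_pos hc, if_pos hc, pvBuildA_eq w dp htab (l + 1) (r - 1) (by omega) (by omega)]
      · have e1 : pvGet2 dp (l + 1) r = pvC w (l + 1) r := by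
          have h := htab (l + 1) r (by omega) (by omega) (by omega) hr
          by_cases h' : l + 1 < r
          · rw [h, if_pos h']
          · rw [h, if_neg h', pvC_of_ge w (by omega)]
        have e2 : pvGet2 dp l (r - 1) = pvC w l (r - 1) := by
          have h := htab l (r - 1) hl (by omega) (by omega) (by omega)
          by_cases h' : l < r - 1
          · rw [h, if_pos h']
          · rw [h, if_neg h', pvC_of_ge w (by omega)]
        rw [if_neg hc, if_neg hc, e1, e2]
        by_cases hlt : pvC w (l + 1) r < pvC w l (r - 1)
        · rw [if_pos hlt, if_pos hlt, pvBuildA_eq w dp htab (l + 1) r (by omega) hr]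
        · rw [if_neg hlt, if_neg hlt, pvBuildA_eq w dp htab l (r - 1) hl (by omega)]
termination_by (r - l + 1).toNat
decreasing_by all_goals omega

-- table entries during the sweep: lengths + value description
def pvTabInv (w : List Char) (dp : List (List Int)) (P : Int → Int → Prop) : Prop :=
  dp.length = w.length ∧ (∀ row ∈ dp, row.length = w.length) ∧
  ∀ l r : Int, 0 ≤ l → l < (w.length : Int) → 0 ≤ r → r < (w.length : Int) →
    (P l r → pvGet2 dp l r = pvC w l r) ∧ (¬ P l r → pvGet2 dp l r = 0)

theorem pvTabInv_mono (w : List Char) (dp : List (List Int)) (P Q : Int → Int → Prop)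
    (h : pvTabInv w dp P)
    (hpq : ∀ l r : Int, 0 ≤ l → l < (w.length : Int) → 0 ≤ r → r < (w.length : Int) →
      (P l r ↔ Q l r)) : pvTabInv w dp Q := by
  refine ⟨h.1, h.2.1, fun l r hl hln hr hrn => ?_⟩
  have h3 := h.2.2 l r hl hln hr hrn
  have hiff := hpq l r hl hln hr hrn
  exact ⟨fun hq => h3.1 (hiff.2 hq), fun hq => h3.2 (fun hp => hq (hiff.1 hp))⟩

theorem pvSet2_length (dp : List (List Int)) (i j v : Int) (hi : 0 ≤ i) :
    (pvSet2 dp i j v).length = dp.length := by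
  unfold pvSet2
  rw [PySem.List.pySetD_of_nonneg _ _ hi]
  exact List.length_set ..

theorem pvSet2_rows (dp : List (List Int)) (n : Nat) (hlen : dp.length = n)
    (hrows : ∀ row ∈ dp, row.length = n) (i j v : Int) (hi : 0 ≤ i) (hi2 : i < (n : Int))
    (hj : 0 ≤ j) :
    ∀ row ∈ pvSet2 dp i j v, row.length = n := by
  intro row hrow
  unfold pvSet2 at hrow
  rw [PySem.List.pySetD_of_nonneg _ _ hi, PySem.List.pySetD_of_nonneg _ _ hj] at hrow
  rcases List.mem_or_eq_of_mem_set hrow with h | h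
  · exact hrows row h
  · subst h
    rw [List.length_set, PySem.List.pyGetD_eq_getElem dp [] hi (by omega)]
    exact hrows _ (List.getElem_mem _)

theorem pvGet2_set (dp : List (List Int)) (n : Nat) (hlen : dp.length = n)
    (hrows : ∀ row ∈ dp, row.length = n) (i j : Int)
    (hi : 0 ≤ i) (hi2 : i < (n : Int)) (hj : 0 ≤ j) (hj2 : j < (n : Int)) (v : Int)
    (l r : Int) (hl : 0 ≤ l) (hln : l < (n : Int)) (hr : 0 ≤ r) (hrn : r < (n : Int)) :
    pvGet2 (pvSet2 dp i j v) l r = if l = i ∧ r = j then v else pvGet2 dp l r := by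
  have hrowlen : ∀ (k : Nat) (hk : k < dp.length), dp[k].length = n :=
    fun k hk => hrows _ (List.getElem_mem _)
  unfold pvGet2 pvSet2
  rw [PySem.List.pySetD_of_nonneg _ _ hi, PySem.List.pySetD_of_nonneg _ _ hj]
  rw [PySem.List.pyGetD_eq_getElem dp [] hi (by omega)]
  rw [PySem.List.pyGetD_eq_getElem _ [] hl (by rw [List.length_set]; omega)]
  rw [PySem.List.pyGetD_eq_getElem dp [] hl (by omega)]
  by_cases hli : l = i
  · subst hli
    rw [List.getElem_set_self]
    rw [PySem.List.pyGetD_eq_getElem _ 0 hr (by rw [List.length_set, hrowlen]; omega)]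
    rw [PySem.List.pyGetD_eq_getElem _ 0 hr (by rw [hrowlen]; omega)]
    by_cases hrj : r = j
    · subst hrj
      rw [List.getElem_set_self, if_pos ⟨rfl, rfl⟩]
    · rw [List.getElem_set_ne (by omega), if_neg (by tauto)]
  · rw [List.getElem_set_ne (by omega), if_neg (by tauto)]

theorem pvInner (w : List Char) (g : Int) (hg : 1 ≤ g) (r0 : Int) (hr0 : g ≤ r0)
    (dp : List (List Int))
    (h : pvTabInv w dp (fun l r => l < r ∧ (r - l ≤ g - 1 ∨ (r - l = g ∧ r < r0)))) :
    pvTabInv w ((PySem.List.pyRange r0 (w.length : Int) 1).foldl (pvStep w) (dp, r0 - g)).1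
      (fun l r => l < r ∧ r - l ≤ g) := by
  by_cases hend : (w.length : Int) ≤ r0
  · rw [PySem.List.pyRange_one_eq_nil hend]
    exact pvTabInv_mono w dp _ _ h (fun l r hl hln hr hrn => by omega)
  · rw [not_le] at hend
    obtain ⟨h1, h2, h3⟩ := h
    have hC : pvC w (r0 - g) r0 =
        (if PySem.List.pyGetD w (r0 - g) ' ' = PySem.List.pyGetD w r0 ' ' then
          pvC w (r0 - g + 1) (r0 - 1)
        else min (pvC w (r0 - g) (r0 - 1)) (pvC w (r0 - g + 1) r0) + 1) := by
      rw [pvC, if_neg (by omega)]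
    have hstep : pvStep w (dp, r0 - g) r0 =
        (pvSet2 dp (r0 - g) r0 (pvC w (r0 - g) r0), r0 - g + 1) := by
      simp only [pvStep]
      split_ifs with hc
      · have e : pvGet2 dp (r0 - g + 1) (r0 - 1) = pvC w (r0 - g + 1) (r0 - 1) := by
          by_cases hlt : r0 - g + 1 < r0 - 1
          · exact (h3 (r0 - g + 1) (r0 - 1) (by omega) (by omega) (by omega) (by omega)).1
              ⟨hlt, by omega⟩
          · rw [(h3 (r0 - g + 1) (r0 - 1) (by omega) (by omega) (by omega) (by omega)).2
              (fun hp => hlt hp.1), pvC_of_ge w (by omega)]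
        rw [e, hC, if_pos hc]
      · have e1 : pvGet2 dp (r0 - g) (r0 - 1) = pvC w (r0 - g) (r0 - 1) := by
          by_cases hlt : r0 - g < r0 - 1
          · exact (h3 (r0 - g) (r0 - 1) (by omega) (by omega) (by omega) (by omega)).1
              ⟨hlt, by omega⟩
          · rw [(h3 (r0 - g) (r0 - 1) (by omega) (by omega) (by omega) (by omega)).2
              (fun hp => hlt hp.1), pvC_of_ge w (by omega)]
        have e2 : pvGet2 dp (r0 - g + 1) r0 = pvC w (r0 - g + 1) r0 := by
          by_cases hlt : r0 - g + 1 < r0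
          · exact (h3 (r0 - g + 1) r0 (by omega) (by omega) (by omega) (by omega)).1
              ⟨hlt, by omega⟩
          · rw [(h3 (r0 - g + 1) r0 (by omega) (by omega) (by omega) (by omega)).2
              (fun hp => hlt hp.1), pvC_of_ge w (by omega)]
        rw [e1, e2, hC, if_neg hc]
    have h' : pvTabInv w (pvSet2 dp (r0 - g) r0 (pvC w (r0 - g) r0))
        (fun l r => l < r ∧ (r - l ≤ g - 1 ∨ (r - l = g ∧ r < r0 + 1))) := by
      refine ⟨?_, ?_, ?_⟩
      · rw [pvSet2_length _ _ _ _ (by omega)]; exact h1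
      · exact pvSet2_rows dp w.length h1 h2 _ _ _ (by omega) (by omega) (by omega)
      · intro l r hl hln hr hrn
        rw [pvGet2_set dp w.length h1 h2 (r0 - g) r0 (by omega) (by omega) (by omega)
          (by omega) _ l r hl hln hr hrn]
        by_cases hk : l = r0 - g ∧ r = r0
        · rw [if_pos hk]
          obtain ⟨e1', e2'⟩ := hk
          subst e1'; subst e2'
          exact ⟨fun _ => rfl, fun hnp => absurd ⟨by omega, Or.inr ⟨by omega, by omega⟩⟩ hnp⟩
        · rw [if_neg hk]
          have h3' := h3 l r hl hln hr hrn
          exact ⟨fun hq => h3'.1 (by omega), fun hq => h3'.2 (fun hp => hq (by omega))⟩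
    rw [PySem.List.pyRange_one_cons hend, List.foldl_cons, hstep,
      show r0 - g + 1 = r0 + 1 - g by omega]
    exact pvInner w g hg (r0 + 1) (by omega) _ h'
termination_by ((w.length : Int) - r0).toNat
decreasing_by all_goals omega

theorem pvOuter (w : List Char) (g : Int) (hg : 1 ≤ g) (dp : List (List Int))
    (h : pvTabInv w dp (fun l r => l < r ∧ r - l ≤ g - 1)) :
    pvTabInv w ((PySem.List.pyRange g (w.length : Int) 1).foldl (pvGapPass w) dp)
      (fun l r => l < r) := by
  by_cases hend : (w.length : Int) ≤ g
  · rw [PySem.List.pyRange_one_eq_nil hend]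
    exact pvTabInv_mono w dp _ _ h (fun l r hl hln hr hrn => by omega)
  · rw [not_le] at hend
    rw [PySem.List.pyRange_one_cons hend, List.foldl_cons]
    have hin := pvInner w g hg g (le_refl g) dp
      (pvTabInv_mono w dp _ _ h (fun l r hl hln hr hrn => by omega))
    have hgp : pvGapPass w dp g =
        ((PySem.List.pyRange g (w.length : Int) 1).foldl (pvStep w) (dp, g - g)).1 := by
      rw [show g - g = (0 : Int) by omega]
      rfl
    rw [hgp]
    exact pvOuter w (g + 1) (by omega) _
      (pvTabInv_mono w _ _ _ hin (fun l r hl hln hr hrn => by omega))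
termination_by ((w.length : Int) - g).toNat
decreasing_by all_goals omega

theorem pvDp0 (w : List Char) :
    pvTabInv w ((PySem.List.pyRange 0 (w.length : Int) 1).map
      (fun _ => (PySem.List.pyRange 0 (w.length : Int) 1).map (fun _ => (0 : Int))))
      (fun l r => l < r ∧ r - l ≤ 0) := by
  refine ⟨by simp, ?_, ?_⟩
  · intro row hrow
    rcases List.mem_map.1 hrow with ⟨_, _, hrow⟩
    subst hrow
    simp
  · intro l r hl hln hr hrn
    have e : pvGet2 ((PySem.List.pyRange 0 (w.length : Int) 1).map
        (fun _ => (PySem.List.pyRange 0 (w.length : Int) 1).map (fun _ => (0 : Int)))) l r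
        = 0 := by
      unfold pvGet2
      rw [PySem.List.pyGetD_map_pyRange_of_nonneg _ _ _ _ hl hln,
        PySem.List.pyGetD_map_pyRange_of_nonneg _ _ _ _ hr hrn]
    exact ⟨fun hp => absurd hp (by omega), fun _ => e⟩

-- ===== main equalities =====

theorem pvA_eq (word : String) :
    create_palindrome_2 word = String.ofList (pvBuildS word.toList 0 ((word.toList.length : Int) - 1)) := by
  have hdp0 : pvTabInv word.toList
      ((PySem.List.pyRange 0 (word.toList.length : Int) 1).map
        (fun _ => (PySem.List.pyRange 0 (word.toList.length : Int) 1).map (fun _ => (0 : Int))))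
      (fun l r => l < r ∧ r - l ≤ 1 - 1) :=
    pvTabInv_mono _ _ _ _ (pvDp0 word.toList) (fun l r _ _ _ _ => by omega)
  have hdp := pvOuter word.toList 1 (le_refl 1) _ hdp0
  show String.ofList (pvBuildA word.toList _ 0 ((word.toList.length : Int) - 1)) = _
  exact congrArg String.ofList (pvBuildA_eq _ _ (fun l r hl hln hr hrn => by
    by_cases hlr : l < r
    · rw [if_pos hlr]
      exact (hdp.2.2 l r hl hln hr hrn).1 hlr
    · rw [if_neg hlr]
      exact (hdp.2.2 l r hl hln hr hrn).2 hlr) 0 _ (by omega) (by omega))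

theorem pvB_eq (word : String) :
    create_palindrome_2_alt word = String.ofList (pvBuildS word.toList 0 ((word.toList.length : Int) - 1)) := by
  have h := pvBuildLoop_spec word.toList PySem.Dict.empty 0 ((word.toList.length : Int) - 1)
    [] [] (pvValid_empty word.toList)
  show String.ofList (pvFinish word.toList
    (pvBuildLoop word.toList PySem.Dict.empty 0 ((word.toList.length : Int) - 1) [] [])) = _
  rw [h]
  simp

-- ===== VERDICT (by name: the statement is the Claim_ definition above) =====
theorem create_palindrome_2_spec : Claim_equal_create_palindrome_2 := by
  intro word _
  unfold Spec_create_palindrome_2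
  rw [pvA_eq, pvB_eq]
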